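-- pv_equiv track=rewrite | github.com/izaak-coleman/DataGen-AnalysisScripts | countsSRSCDistribution.py | splitIntosSRSC
-- ===== SOURCE A (Python) =====
-- def splitIntosSRSC(calls, W):
--   """Function uses seed and extend to group SNV calls into sSRSC."""
--   sSRSCs = []
--   i = 0
--   while i < len(calls)-1:
--     sSRSC = []
--     extend = i+1
--     sSRSC.append(calls[i]) # ith element seeds the next sSRSC
--     if abs(calls[i][1] - calls[extend][1]) <= W: # then extend sSRSC
--       sSRSC.append(calls[extend])
--       extend = extend + 1
--       while extend < len(calls) and abs(calls[i][1] - calls[extend][1]) <= W: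
--         sSRSC.append(calls[extend])
--         extend = extend + 1
--     i = extend
--     sSRSCs.append(sSRSC)
--
--   # Last element is a 1-sSRSC
--   if i == len(calls) - 1:
--     sSRSC = []
--     sSRSC.append(calls[i])
--     sSRSCs.append(sSRSC)
--
--   return sSRSCs
-- ===== SOURCE B (Python) =====
-- def splitIntosSRSC(calls, W):
--   """Two staged passes: first record the start index of each cluster (a call
--   starts a new cluster when it leaves the current seed's window), then cut the
--   list into clusters by slicing between consecutive boundaries."""
--   bounds = []
--   seed_pos = None
--   for i, c in enumerate(calls):
--     if seed_pos is None or abs(seed_pos - c[1]) > W: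
--       bounds.append(i)
--       seed_pos = c[1]
--   bounds.append(len(calls))
--   return [calls[i:j] for i, j in zip(bounds, bounds[1:])]
-- ===== Notes on version B (the rewrite author's own statement) =====
-- stated objective: alternative
-- what changed: Replaced A's index-jumping nested while loops that build each cluster by appending with two staged passes: an enumerate pass that records only the start index of each cluster, then a zip-of-consecutive-boundaries slicing comprehension that cuts the list into clusters.
import Mathlib
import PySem

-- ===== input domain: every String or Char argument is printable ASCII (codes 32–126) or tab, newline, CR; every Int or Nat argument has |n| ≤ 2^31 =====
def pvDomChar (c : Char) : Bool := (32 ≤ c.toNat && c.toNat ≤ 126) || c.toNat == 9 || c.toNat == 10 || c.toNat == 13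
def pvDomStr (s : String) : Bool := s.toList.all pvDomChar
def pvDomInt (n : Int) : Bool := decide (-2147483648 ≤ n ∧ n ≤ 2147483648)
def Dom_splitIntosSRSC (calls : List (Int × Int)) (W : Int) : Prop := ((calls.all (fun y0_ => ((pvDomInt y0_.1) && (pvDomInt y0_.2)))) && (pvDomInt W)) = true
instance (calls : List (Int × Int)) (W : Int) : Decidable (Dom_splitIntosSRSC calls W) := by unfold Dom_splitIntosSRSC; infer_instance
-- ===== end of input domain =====

-- B replaces A's index-jumping nested while loops by two staged passes — a boundary-index
-- pass and a slicing comprehension (objective: alternative); same return value on every input.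

-- ===== PORT A =====
-- inner while loop: `while extend < len(calls) and abs(calls[i][1]-calls[extend][1]) <= W`
-- (fuel makes the while loop structurally recursive; `calls.length` fuel is always enough)
def innerA (calls : List (Int × Int)) (W : Int) (s2 : Int) :
    Nat → Nat → List (Int × Int) → List (Int × Int) × Nat
  | 0, e, sSRSC => (sSRSC, e)
  | fuel + 1, e, sSRSC =>
    if h : e < calls.length then
      if |s2 - (calls[e]'h).2| ≤ W then
        innerA calls W s2 fuel (e + 1) (sSRSC ++ [calls[e]'h])
      else (sSRSC, e)
    else (sSRSC, e)

-- outer while loop: `while i < len(calls)-1` (fuel-guarded; each pass advances i by at least 1)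
def outerA (calls : List (Int × Int)) (W : Int) :
    Nat → Nat → List (List (Int × Int)) → List (List (Int × Int)) × Nat
  | 0, i, sSRSCs => (sSRSCs, i)
  | fuel + 1, i, sSRSCs =>
    if h : i + 1 < calls.length then
      if |(calls[i]'(by omega)).2 - (calls[i+1]'h).2| ≤ W then
        let r := innerA calls W (calls[i]'(by omega)).2 calls.length (i + 2)
                   [calls[i]'(by omega), calls[i+1]'h]
        outerA calls W fuel r.2 (sSRSCs ++ [r.1])
      else
        outerA calls W fuel (i + 1) (sSRSCs ++ [[calls[i]'(by omega)]])
    else (sSRSCs, i)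

def splitIntosSRSC (calls : List (Int × Int)) (W : Int) : List (List (Int × Int)) :=
  let r := outerA calls W calls.length 0 []
  -- `if i == len(calls) - 1:` (Python ints: compare in ℤ, so the empty list gives -1 ≠ 0)
  if (r.2 : Int) = (calls.length : Int) - 1 then r.1 ++ [[calls.getD r.2 (0, 0)]] else r.1

-- ===== PORT B =====
-- loop body of Source B's first pass: `if seed_pos is None or abs(seed_pos - c[1]) > W: …`
def boundsStep (W : Int) (st : List Int × Option Int) (ic : Int × (Int × Int)) :
    List Int × Option Int :=
  match st.2 with
  | none => (st.1 ++ [ic.1], some ic.2.2)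
  | some sp => if W < |sp - ic.2.2| then (st.1 ++ [ic.1], some ic.2.2) else st

def splitIntosSRSC_alt (calls : List (Int × Int)) (W : Int) : List (List (Int × Int)) :=
  -- pass 1: `for i, c in enumerate(calls): …` collecting cluster start indices
  let p := (PySem.List.enumerate calls).foldl (boundsStep W) ([], none)
  let bounds := p.1 ++ [(calls.length : Int)]
  -- pass 2: `[calls[i:j] for i, j in zip(bounds, bounds[1:])]`
  (bounds.zip (PySem.List.slice bounds (some 1) none)).map
    (fun ij => PySem.List.slice calls (some ij.1) (some ij.2))

-- ===== PRECONDITION & SPEC =====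
def Spec_splitIntosSRSC (calls : List (Int × Int)) (W : Int) (out : List (List (Int × Int))) : Prop := out = splitIntosSRSC_alt calls W
instance (calls : List (Int × Int)) (W : Int) (out : List (List (Int × Int))) : Decidable (Spec_splitIntosSRSC calls W out) := by unfold Spec_splitIntosSRSC; infer_instance

-- ===== CLAIM (what is proved, stated in full; the proofs are below) =====
def Claim_equal_splitIntosSRSC : Prop := ∀ (calls : List (Int × Int)) (W : Int), Dom_splitIntosSRSC calls W → Spec_splitIntosSRSC calls W (splitIntosSRSC calls W)

-- ===== LEMMAS AND PROOFS =====

-- window predicate relative to a cluster seed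
def pcond (W s2 : Int) (c : Int × Int) : Bool := |s2 - c.2| ≤ W

-- common reference function for the two ports: seed, take the window, recurse on the rest
def specF (W : Int) : List (Int × Int) → List (List (Int × Int))
  | [] => []
  | s :: rest =>
      (s :: rest.takeWhile (pcond W s.2)) :: specF W (rest.dropWhile (pcond W s.2))
termination_by l => l.length
decreasing_by
  exact Nat.lt_succ_of_le (List.length_dropWhile_le _ _)

theorem dropWhile_eq_drop_len {α : Type} (p : α → Bool) (l : List α) :
    l.dropWhile p = l.drop (l.takeWhile p).length := by
  induction l with
  | nil => simp
  | cons h t ih => by_cases hp : p h <;> simp [hp, ih]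

theorem takeWhile_eq_take_len {α : Type} (p : α → Bool) (l : List α) :
    l.takeWhile p = l.take (l.takeWhile p).length := by
  induction l with
  | nil => simp
  | cons h t ih =>
      by_cases hp : p h <;> simp [hp]
      exact ih

theorem innerA_eq (calls : List (Int × Int)) (W s2 : Int) :
    ∀ (fuel e : Nat) (acc : List (Int × Int)), calls.length ≤ e + fuel →
      innerA calls W s2 fuel e acc =
        (acc ++ (calls.drop e).takeWhile (pcond W s2),
         e + ((calls.drop e).takeWhile (pcond W s2)).length) := by
  intro fuel
  induction fuel with
  | zero =>
      intro e acc hf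
      rw [List.drop_eq_nil_of_le (by omega)]
      simp [innerA]
  | succ fuel ih =>
      intro e acc hf
      by_cases h : e < calls.length
      · by_cases hc : |s2 - (calls[e]'h).2| ≤ W
        · have hp : pcond W s2 (calls[e]'h) = true := by simp [pcond, hc]
          rw [innerA, dif_pos h, if_pos hc, ih (e + 1) (acc ++ [calls[e]'h]) (by omega),
            List.drop_eq_getElem_cons h, List.takeWhile_cons, hp, if_pos rfl]
          simp only [Prod.mk.injEq, List.append_assoc, List.singleton_append, List.length_cons]
          exact ⟨trivial, by omega⟩
        · have hp : pcond W s2 (calls[e]'h) = false := by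
            simp [pcond]; exact not_le.mp hc
          rw [innerA, dif_pos h, if_neg hc, List.drop_eq_getElem_cons h,
            List.takeWhile_cons, hp]
          simp
      · rw [innerA, dif_neg h, List.drop_eq_nil_of_le (by omega)]
        simp

theorem outerA_eq (calls : List (Int × Int)) (W : Int) :
    ∀ (fuel i : Nat) (acc : List (List (Int × Int))), calls.length ≤ i + fuel →
      (if ((outerA calls W fuel i acc).2 : Int) = (calls.length : Int) - 1 then
          (outerA calls W fuel i acc).1 ++ [[calls.getD (outerA calls W fuel i acc).2 (0, 0)]]
        else (outerA calls W fuel i acc).1)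
        = acc ++ specF W (calls.drop i) := by
  intro fuel
  induction fuel with
  | zero =>
      intro i acc hf
      by_cases hi : i + 1 = calls.length
      · have h0 : i < calls.length := by omega
        have hcond : (i : Int) = (calls.length : Int) - 1 := by omega
        rw [List.drop_eq_getElem_cons h0, List.drop_eq_nil_of_le (by omega), specF]
        simp [outerA, hcond, specF, List.getElem?_eq_getElem h0]
      · have hge : calls.length ≤ i := by omega
        have hcond : ¬ ((i : Int) = (calls.length : Int) - 1) := by omega
        rw [List.drop_eq_nil_of_le hge]
        simp [outerA, hcond, specF]
  | succ fuel ih =>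
      intro i acc hf
      by_cases h : i + 1 < calls.length
      · have h0 : i < calls.length := by omega
        by_cases hc : |(calls[i]'h0).2 - (calls[i+1]'h).2| ≤ W
        · rw [outerA, dif_pos h, if_pos hc]
          have hr := innerA_eq calls W (calls[i]'h0).2 calls.length (i + 2)
            [calls[i]'h0, calls[i+1]'h] (by omega)
          set r := innerA calls W (calls[i]'h0).2 calls.length (i + 2)
            [calls[i]'h0, calls[i+1]'h] with hrdef
          have hr2 : i + 2 ≤ r.2 := by rw [hr]; omega
          rw [ih r.2 (acc ++ [r.1]) (by omega)]
          rw [List.drop_eq_getElem_cons h0, specF]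
          have hd1 : calls.drop (i+1) = calls[i+1]'h :: calls.drop (i+2) :=
            List.drop_eq_getElem_cons h
          have hp : pcond W (calls[i]'h0).2 (calls[i+1]'h) = true := by simp [pcond, hc]
          have htw : (calls.drop (i+1)).takeWhile (pcond W (calls[i]'h0).2)
              = calls[i+1]'h :: (calls.drop (i+2)).takeWhile (pcond W (calls[i]'h0).2) := by
            rw [hd1, List.takeWhile_cons, hp]; simp
          have hdw : (calls.drop (i+1)).dropWhile (pcond W (calls[i]'h0).2) = calls.drop r.2 := by
            rw [dropWhile_eq_drop_len, htw, List.drop_drop, hr]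
            congr 1
            simp; omega
          rw [htw, hdw, hr]
          simp
        · rw [outerA, dif_pos h, if_neg hc]
          rw [ih (i + 1) (acc ++ [[calls[i]'h0]]) (by omega)]
          rw [List.drop_eq_getElem_cons h0, specF]
          have hd1 : calls.drop (i+1) = calls[i+1]'h :: calls.drop (i+2) :=
            List.drop_eq_getElem_cons h
          have hp : pcond W (calls[i]'h0).2 (calls[i+1]'h) = false := by
            simp [pcond]; exact not_le.mp hc
          have htw : (calls.drop (i+1)).takeWhile (pcond W (calls[i]'h0).2) = [] := by
            rw [hd1, List.takeWhile_cons, hp]; simp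
          have hdw : (calls.drop (i+1)).dropWhile (pcond W (calls[i]'h0).2) = calls.drop (i+1) := by
            rw [hd1, List.dropWhile_cons, hp]; simp
          rw [htw, hdw]
          simp
      · by_cases hi : i + 1 = calls.length
        · have h0 : i < calls.length := by omega
          have hcond : (i : Int) = (calls.length : Int) - 1 := by omega
          rw [List.drop_eq_getElem_cons h0, List.drop_eq_nil_of_le (by omega), specF]
          rw [outerA, dif_neg h]
          simp [hcond, specF, List.getElem?_eq_getElem h0]
        · have hge : calls.length ≤ i := by omega
          have hcond : ¬ ((i : Int) = (calls.length : Int) - 1) := by omega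
          rw [List.drop_eq_nil_of_le hge, outerA, dif_neg h]
          simp [hcond, specF]

-- cluster start indices of a suffix beginning at position i (the value pass 1 computes)
def startsN (W : Int) : Nat → List (Int × Int) → List Int
  | _, [] => []
  | i, s :: rest =>
      (i : Int) :: startsN W (i + 1 + (rest.takeWhile (pcond W s.2)).length)
        (rest.dropWhile (pcond W s.2))
termination_by _ l => l.length
decreasing_by
  exact Nat.lt_succ_of_le (List.length_dropWhile_le _ _)

theorem fold_some (W : Int) (l : List (Int × Int)) :
    ∀ (i : Nat) (bs : List Int) (sp : Int),
      ((PySem.List.enumerate l (i : Int)).foldl (boundsStep W) (bs, some sp)).1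
        = bs ++ startsN W (i + (l.takeWhile (pcond W sp)).length) (l.dropWhile (pcond W sp)) := by
  induction l with
  | nil => intro i bs sp; simp [PySem.List.enumerate_nil, startsN]
  | cons c rest ih =>
      intro i bs sp
      rw [PySem.List.enumerate_cons]
      by_cases hc : |sp - c.2| ≤ W
      · have hstep : boundsStep W (bs, some sp) ((i : Int), c) = (bs, some sp) := by
          simp [boundsStep, not_lt.mpr hc]
        have hp : pcond W sp c = true := by simp [pcond, hc]
        have hcast : (i : Int) + 1 = ((i + 1 : Nat) : Int) := by push_cast; ring
        rw [List.foldl_cons, hstep, hcast, ih (i + 1) bs sp,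
          List.takeWhile_cons_of_pos hp, List.dropWhile_cons_of_pos hp]
        congr 2
        simp
        omega
      · have hstep : boundsStep W (bs, some sp) ((i : Int), c) = (bs ++ [(i : Int)], some c.2) := by
          simp [boundsStep, not_le.mp hc]
        have hp : pcond W sp c = false := by simp [pcond]; exact not_le.mp hc
        have hcast : (i : Int) + 1 = ((i + 1 : Nat) : Int) := by push_cast; ring
        rw [List.foldl_cons, hstep, hcast, ih (i + 1) (bs ++ [(i : Int)]) c.2,
          List.takeWhile_cons_of_neg (by simp [hp]), List.dropWhile_cons_of_neg (by simp [hp])]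
        rw [startsN]
        simp [Nat.add_assoc]

theorem pass1_eq (W : Int) (calls : List (Int × Int)) :
    ((PySem.List.enumerate calls).foldl (boundsStep W) ([], none)).1 = startsN W 0 calls := by
  cases calls with
  | nil => simp [PySem.List.enumerate, startsN]
  | cons c rest =>
      have h0 : PySem.List.enumerate (c :: rest) = (0, c) :: PySem.List.enumerate rest 1 :=
        PySem.List.enumerate_cons c rest 0
      have hstep : boundsStep W ([], none) ((0 : Int), c) = ([(0 : Int)], some c.2) := by
        simp [boundsStep]
      have h1 : (1 : Int) = ((1 : Nat) : Int) := by norm_num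
      rw [h0, List.foldl_cons, hstep, h1, fold_some W rest 1 [(0 : Int)] c.2, startsN]
      simp

theorem zipslice (W : Int) (calls : List (Int × Int)) :
    ∀ (n : Nat) (l : List (Int × Int)) (i : Nat), l.length ≤ n → calls.drop i = l →
      (((startsN W i l ++ [(calls.length : Int)]).zip
          (startsN W i l ++ [(calls.length : Int)]).tail).map
        (fun ij => PySem.List.slice calls (some ij.1) (some ij.2))) = specF W l := by
  intro n
  induction n with
  | zero =>
      intro l i hn hd
      have : l = [] := List.eq_nil_of_length_eq_zero (by omega)
      subst this
      simp [startsN, specF]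
  | succ n ih =>
      intro l i hn hd
      cases l with
      | nil => simp [startsN, specF]
      | cons s rest =>
          have hi : i < calls.length := by
            by_contra hge
            rw [List.drop_eq_nil_of_le (by omega)] at hd
            exact absurd hd (by simp)
          have hrest : calls.drop (i + 1) = rest := by
            simpa using congrArg (List.drop 1) hd
          set k := (rest.takeWhile (pcond W s.2)).length with hk
          have hkle : k ≤ rest.length := by
            rw [hk]; exact (List.takeWhile_prefix _).length_le
          have hlen : rest.length = calls.length - (i + 1) := by
            have := congrArg List.length hrest
            simp at this
            omega
          have hj : i + 1 + k ≤ calls.length := by omega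
          have hdw : calls.drop (i + 1 + k) = rest.dropWhile (pcond W s.2) := by
            rw [← List.drop_drop, hrest, dropWhile_eq_drop_len]
          rw [startsN]
          have hhead : startsN W (i + 1 + k) (rest.dropWhile (pcond W s.2)) ++
              [(calls.length : Int)] = ((i + 1 + k : Nat) : Int) ::
                ((startsN W (i + 1 + k) (rest.dropWhile (pcond W s.2)) ++
                  [(calls.length : Int)]).tail) := by
            cases hdd : rest.dropWhile (pcond W s.2) with
            | nil =>
                have hnil : calls.drop (i + 1 + k) = [] := by rw [hdw, hdd]
                have hge := List.drop_eq_nil_iff.mp hnil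
                have : i + 1 + k = calls.length := by omega
                simp [startsN, this]
            | cons d ds => rw [startsN]; simp
          have hslice : PySem.List.slice calls (some ((i : Nat) : Int))
              (some ((i + 1 + k : Nat) : Int)) = s :: rest.takeWhile (pcond W s.2) := by
            rw [PySem.List.slice_natCast]
            have : i + 1 + k - i = 1 + k := by omega
            rw [this, hd, List.take_add, List.take_one]
            simp only [List.head?_cons, Option.toList_some, List.singleton_append,
              List.drop_one, List.tail_cons]
            congr 1
            rw [hk, ← takeWhile_eq_take_len]
          have hn' : rest.length + 1 ≤ n + 1 := by simpa using hn
          rw [List.cons_append, hhead, List.tail_cons]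
          rw [List.zip_cons_cons, List.map_cons, hslice]
          rw [← hhead, ih (rest.dropWhile (pcond W s.2)) (i + 1 + k)
            (by have := List.length_dropWhile_le (pcond W s.2) rest; omega) hdw]
          rw [specF]

theorem alt_eq_specF (calls : List (Int × Int)) (W : Int) :
    splitIntosSRSC_alt calls W = specF W calls := by
  simp only [splitIntosSRSC_alt, PySem.List.slice_from_one, pass1_eq]
  exact zipslice W calls calls.length calls 0 le_rfl (by simp)

theorem a_eq_specF (calls : List (Int × Int)) (W : Int) :
    splitIntosSRSC calls W = specF W calls := by
  have := outerA_eq calls W calls.length 0 [] (by omega)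
  simpa [splitIntosSRSC] using this

-- ===== VERDICT (by name: the statement is the Claim_ definition above) =====
theorem splitIntosSRSC_spec : Claim_equal_splitIntosSRSC := by
  intro calls W _
  unfold Spec_splitIntosSRSC
  rw [a_eq_specF, alt_eq_specF]
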